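-- pv_equiv track=rewrite | github.com/mann-brinson/INF553_DataMining | hw4-graph-analysis/task2.py | bfs
-- ===== SOURCE A (Python) =====
-- from collections import deque
--
-- def bfs(graph, root_node):
--   queue = deque([root_node])
--   level = {root_node: 0}
--   parent = {root_node: []}
--   while queue:
--     v = queue.popleft()
--     for n in graph[v]:
--       if n not in level:
--         queue.append(n)
--         level[n] = level[v] + 1
--       #Add to parent
--       if n not in parent:
--         parent[n] = [v]
--       #Accounts for multiple parents
--       elif n in parent:
--         n_level = level.get(n)
--         v_level = level.get(v)
--         if v_level == n_level - 1:
--           parent[n].append(v)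
--   dag = {}
--   for node in level.keys():
--     dag[node] = (level.get(node), parent.get(node))
--   return dag
-- ===== SOURCE B (Python) =====
-- def bfs(graph, root_node):
--   # Two-pass BFS: phase 1 computes levels only; phase 2 derives every
--   # parent list from the final level map, scanning nodes in BFS pop order.
--   level = {root_node: 0}
--   queue = [root_node]
--   while queue:
--     v = queue.pop(0)
--     for n in graph[v]:
--       if n not in level:
--         level[n] = level[v] + 1
--         queue.append(n)
--   parent = {node: [] for node in level}
--   for v in level:
--     for n in graph[v]:
--       if level.get(n) == level[v] + 1:
--         parent[n].append(v)
--   return {node: (level[node], parent[node]) for node in level}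
-- ===== Notes on version B (the rewrite author's own statement) =====
-- stated objective: alternative
-- what changed: A builds level and parent dictionaries simultaneously inside one BFS loop with per-neighbor membership branching; B splits the work into two passes: a plain BFS that computes only the level map, then a second pass over the nodes in BFS order that derives every parent list from the finished level map, plus a final comprehension for the dag.
import Mathlib
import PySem

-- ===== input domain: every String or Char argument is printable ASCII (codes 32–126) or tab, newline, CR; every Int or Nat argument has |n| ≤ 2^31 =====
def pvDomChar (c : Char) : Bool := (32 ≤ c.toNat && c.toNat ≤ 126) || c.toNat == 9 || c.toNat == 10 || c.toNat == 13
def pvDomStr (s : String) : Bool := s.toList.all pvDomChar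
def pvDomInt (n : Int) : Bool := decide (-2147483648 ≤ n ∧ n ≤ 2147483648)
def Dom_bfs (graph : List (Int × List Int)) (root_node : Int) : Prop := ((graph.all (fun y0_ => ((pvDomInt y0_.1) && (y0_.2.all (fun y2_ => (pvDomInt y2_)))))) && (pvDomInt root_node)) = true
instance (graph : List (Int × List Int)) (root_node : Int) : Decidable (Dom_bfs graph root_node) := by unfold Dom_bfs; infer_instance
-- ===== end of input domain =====

-- B replaces A's single BFS loop that interleaves level- and parent-maintenance by a
-- two-pass decomposition (level-only BFS, then parent lists derived from the final level map);
-- equivalence of the RETURN values is proved on adjacency dicts that are key-closed.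

-- ===== PORT A =====
-- all node ids that can ever be discovered besides the root: every neighbour occurring in graph
def bfsAllNodes (graph : List (Int × List Int)) : List Int :=
  (graph.flatMap (fun p => p.2)).dedup

-- Python's unbounded 'while queue' is ported with a fuel counter that provably never runs
-- out: each iteration pops one node and every node is enqueued at most once.
def bfsFuel (graph : List (Int × List Int)) : Nat :=
  (bfsAllNodes graph).length + 1

-- the body of A's 'for n in graph[v]' for one neighbour n of the popped node v
def bfsStepA (v : Int)
    (st : List Int × PySem.Dict Int Int × PySem.Dict Int (List Int)) (n : Int) :
    List Int × PySem.Dict Int Int × PySem.Dict Int (List Int) :=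
  let queue := st.1
  let level := st.2.1
  let parent := st.2.2
  -- if n not in level: queue.append(n); level[n] = level[v] + 1
  let qlv :=
    if level.contains n = false then
      (queue ++ [n], level.insert n (level.getD v 0 + 1))
    else (queue, level)
  -- if n not in parent: parent[n] = [v]
  -- elif n in parent: if level.get(v) == level.get(n) - 1: parent[n].append(v)
  -- (v and n are keys of the updated level whenever the elif runs, so getD's default is never read)
  let parent' :=
    if parent.contains n = false then parent.insert n [v]
    else if qlv.2.getD v 0 = qlv.2.getD n 0 - 1 then parent.modify n [] (fun l => l ++ [v])
    else parent
  (qlv.1, qlv.2, parent')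

def bfsLoopA (g : PySem.Dict Int (List Int)) :
    Nat → List Int → PySem.Dict Int Int → PySem.Dict Int (List Int) →
    PySem.Dict Int Int × PySem.Dict Int (List Int)
  | 0, _, level, parent => (level, parent)          -- fuel exhausted: provably unreachable
  | _ + 1, [], level, parent => (level, parent)
  | fuel + 1, v :: queue, level, parent =>
    let st := (g.getD v []).foldl (bfsStepA v) (queue, level, parent)
    bfsLoopA g fuel st.1 st.2.1 st.2.2

def bfs (graph : List (Int × List Int)) (root_node : Int) : List (Int × Int × List Int) :=
  let g : PySem.Dict Int (List Int) := PySem.Dict.mk graph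
  -- graph[v] is ported as getD g v []: under Pre_bfs every popped v is a key, the default is never read
  let st := bfsLoopA g (bfsFuel graph) [root_node]
    (PySem.Dict.mk [(root_node, 0)]) (PySem.Dict.mk [(root_node, ([] : List Int))])
  -- dag[node] = (level.get(node), parent.get(node)); both keys are always present
  (st.1.keys.foldl
    (fun dag node => dag.insert node (st.1.getD node 0, st.2.getD node [])) PySem.Dict.empty).items

-- ===== PORT B =====
-- phase 1: plain BFS maintaining only the level map
def bfsStepB1 (v : Int) (st : List Int × PySem.Dict Int Int) (n : Int) :
    List Int × PySem.Dict Int Int :=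
  if st.2.contains n = false then (st.1 ++ [n], st.2.insert n (st.2.getD v 0 + 1))
  else st

def bfsLoopB1 (g : PySem.Dict Int (List Int)) :
    Nat → List Int → PySem.Dict Int Int → PySem.Dict Int Int
  | 0, _, level => level                            -- fuel exhausted: provably unreachable
  | _ + 1, [], level => level
  | fuel + 1, v :: queue, level =>
    let st := (g.getD v []).foldl (bfsStepB1 v) (queue, level)
    bfsLoopB1 g fuel st.1 st.2

-- phase 2, body for one node v: append v to parent[n] of every neighbour one level deeper
def bfsStepB2 (g : PySem.Dict Int (List Int)) (level : PySem.Dict Int Int)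
    (parent : PySem.Dict Int (List Int)) (v : Int) : PySem.Dict Int (List Int) :=
  (g.getD v []).foldl
    (fun parent n =>
      if level.get? n = some (level.getD v 0 + 1) then parent.modify n [] (fun l => l ++ [v])
      else parent)
    parent

def bfs_alt (graph : List (Int × List Int)) (root_node : Int) : List (Int × Int × List Int) :=
  let g : PySem.Dict Int (List Int) := PySem.Dict.mk graph
  let level := bfsLoopB1 g (bfsFuel graph) [root_node] (PySem.Dict.mk [(root_node, 0)])
  let parent0 := level.keys.foldl
    (fun d node => d.insert node ([] : List Int)) PySem.Dict.empty
  let parent := level.keys.foldl (bfsStepB2 g level) parent0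
  (level.keys.foldl
    (fun dag node => dag.insert node (level.getD node 0, parent.getD node [])) PySem.Dict.empty).items

-- ===== PRECONDITION & SPEC =====
-- the set of nodes reachable from the root: one widening step adds all neighbours,
-- iterated until it provably stabilises (at most one new node per step)
def pvReachStep (g : PySem.Dict Int (List Int)) (S : List Int) : List Int :=
  (S ++ S.flatMap (fun a => g.getD a [])).dedup

def pvReachIter (g : PySem.Dict Int (List Int)) : Nat → List Int → List Int
  | 0, S => S
  | k + 1, S => pvReachIter g k (pvReachStep g S)

def pvReachable (graph : List (Int × List Int)) (root_node : Int) : List Int :=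
  pvReachIter (PySem.Dict.mk graph) (bfsFuel graph) [root_node]

-- Pre_bfs excludes exactly (i) the inputs on which A raises KeyError — some node reachable
-- from the root has no adjacency entry — and (ii) association lists with duplicate keys,
-- which a Python dict argument cannot carry.
def Pre_bfs (graph : List (Int × List Int)) (root_node : Int) : Prop :=
  (graph.map (fun p => p.1)).Nodup ∧ root_node ∈ graph.map (fun p => p.1) ∧
    ∀ n ∈ pvReachable graph root_node, n ∈ graph.map (fun p => p.1)
instance (graph : List (Int × List Int)) (root_node : Int) : Decidable (Pre_bfs graph root_node) := by
  unfold Pre_bfs; infer_instance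

def pvWitness_bfs : (List (Int × List Int)) × Int := ([(0, [1, 2]), (1, [0, 2]), (2, [])], 0)

def Spec_bfs (graph : List (Int × List Int)) (root_node : Int) (out : List (Int × Int × List Int)) : Prop := out = bfs_alt graph root_node
instance (graph : List (Int × List Int)) (root_node : Int) (out : List (Int × Int × List Int)) : Decidable (Spec_bfs graph root_node out) := by unfold Spec_bfs; infer_instance

-- ===== CLAIM (what is proved, stated in full; the proofs are below) =====
def Claim_equal_bfs : Prop := ∀ (graph : List (Int × List Int)) (root_node : Int), Dom_bfs graph root_node → Pre_bfs graph root_node → Spec_bfs graph root_node (bfs graph root_node)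

-- ===== LEMMAS AND PROOFS =====

-- level maps only ever grow: lv is a sub-map of lv'
def pvSub (lv lv' : PySem.Dict Int Int) : Prop :=
  ∀ k x, lv.get? k = some x → lv'.get? k = some x

lemma pvSub_refl (lv : PySem.Dict Int Int) : pvSub lv lv := fun _ _ h => h

lemma pvSub_trans {a b c : PySem.Dict Int Int} (h1 : pvSub a b) (h2 : pvSub b c) : pvSub a c :=
  fun k x h => h2 k x (h1 k x h)

lemma pvSub_insert {lv : PySem.Dict Int Int} {n : Int} (x : Int)
    (hn : lv.contains n = false) : pvSub lv (lv.insert n x) := by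
  intro k y h
  have hk : k ≠ n := by
    intro he; subst he
    rw [(PySem.Dict.get?_eq_none_iff_contains lv k).2 hn] at h; exact absurd h (by simp)
  rw [PySem.Dict.get?_insert]
  simp [hk, h]

lemma get?_of_contains {lv : PySem.Dict Int Int} {n : Int} (h : lv.contains n = true) :
    ∃ x, lv.get? n = some x := by
  cases hg : lv.get? n with
  | none => rw [(PySem.Dict.get?_eq_none_iff_contains lv n).1 hg] at h; exact Bool.noConfusion h
  | some x => exact ⟨x, rfl⟩

lemma nodup_subset_length {l1 l2 : List Int} (h1 : l1.Nodup) (hs : ∀ x ∈ l1, x ∈ l2) :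
    l1.length ≤ l2.length := by
  calc l1.length = l1.toFinset.card := (List.toFinset_card_of_nodup h1).symm
    _ ≤ l2.toFinset.card := Finset.card_le_card (by intro x hx; simp at hx ⊢; exact hs x hx)
    _ ≤ l2.length := l2.toFinset_card_le

-- the inner 'for n in graph[v]' of A, related to B's phase-1 step and phase-2 step
lemma bfs_inner (v Lv : Int) :
    ∀ (ns q : List Int) (lv : PySem.Dict Int Int) (pr : PySem.Dict Int (List Int)),
    (∀ k, pr.contains k = lv.contains k) →
    lv.keys.Nodup →
    lv.get? v = some Lv →
    ns.foldl (bfsStepB1 v) (q, lv) =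
      ((ns.foldl (bfsStepA v) (q, lv, pr)).1, (ns.foldl (bfsStepA v) (q, lv, pr)).2.1) ∧
    (∃ fr, (ns.foldl (bfsStepA v) (q, lv, pr)).2.1.keys = lv.keys ++ fr ∧
           (ns.foldl (bfsStepA v) (q, lv, pr)).1 = q ++ fr ∧ ∀ x ∈ fr, x ∈ ns) ∧
    (ns.foldl (bfsStepA v) (q, lv, pr)).2.1.keys.Nodup ∧
    pvSub lv (ns.foldl (bfsStepA v) (q, lv, pr)).2.1 ∧
    (∀ k, (ns.foldl (bfsStepA v) (q, lv, pr)).2.2.contains k =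
          (ns.foldl (bfsStepA v) (q, lv, pr)).2.1.contains k) ∧
    (∀ LF : PySem.Dict Int Int, pvSub (ns.foldl (bfsStepA v) (q, lv, pr)).2.1 LF →
      ∀ d : PySem.Dict Int (List Int), (∀ k, d.getD k [] = pr.getD k []) →
      ∀ k, (ns.foldl (fun d n => if LF.get? n = some (LF.getD v 0 + 1)
                    then d.modify n [] (fun l => l ++ [v]) else d) d).getD k []
            = (ns.foldl (bfsStepA v) (q, lv, pr)).2.2.getD k []) := by
  intro ns
  induction ns with
  | nil =>
    intro q lv pr hkeq hnd hv
    refine ⟨rfl, ⟨[], by simp, by simp, by simp⟩, hnd, pvSub_refl lv, hkeq, ?_⟩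
    intro LF _ d hd k
    simpa using hd k
  | cons n rest ih =>
    intro q lv pr hkeq hnd hv
    have hvD : lv.getD v 0 = Lv := PySem.Dict.getD_of_get?_eq_some _ 0 hv
    by_cases hn : lv.contains n = true
    · -- n already in level: queue/level unchanged, possible parent append
      obtain ⟨Ln, hLn⟩ := get?_of_contains hn
      have hprn : pr.contains n = true := by rw [hkeq n]; exact hn
      have hLnD : lv.getD n 0 = Ln := PySem.Dict.getD_of_get?_eq_some _ 0 hLn
      have hstA : bfsStepA v (q, lv, pr) n =
          (q, lv, if lv.getD v 0 = lv.getD n 0 - 1 then pr.modify n [] (fun l => l ++ [v]) else pr) := by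
        simp [bfsStepA, hn, hprn]
      have hstB : bfsStepB1 v (q, lv) n = (q, lv) := by simp [bfsStepB1, hn]
      set pr' := if lv.getD v 0 = lv.getD n 0 - 1 then pr.modify n [] (fun l => l ++ [v]) else pr with hpr'
      have hkeq' : ∀ k, pr'.contains k = lv.contains k := by
        intro k
        rw [hpr']
        split
        · rw [PySem.Dict.contains_modify]
          by_cases hkn : k = n
          · subst hkn; simp [hn]
          · simp [hkn, hkeq k]
        · exact hkeq k
      obtain ⟨B1, ⟨fr, hfk, hfq, hfs⟩, nd2, sub2, keq2, ph2⟩ := ih q lv pr' hkeq' hnd hv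
      refine ⟨?_, ⟨fr, ?_, ?_, ?_⟩, ?_, ?_, ?_, ?_⟩
      · simp only [List.foldl_cons, hstA, hstB]; exact B1
      · simp only [List.foldl_cons, hstA]; exact hfk
      · simp only [List.foldl_cons, hstA]; exact hfq
      · intro x hx; exact List.mem_cons_of_mem _ (hfs x hx)
      · simp only [List.foldl_cons, hstA]; exact nd2
      · simp only [List.foldl_cons, hstA]; exact sub2
      · simp only [List.foldl_cons, hstA]; exact keq2
      · intro LF hLF d hd k
        simp only [List.foldl_cons, hstA]
        have hsub : pvSub lv LF := by
          have : pvSub lv (rest.foldl (bfsStepA v) (q, lv, pr')).2.1 := sub2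
          exact pvSub_trans (by simpa only [List.foldl_cons, hstA] using this)
            (by simpa only [List.foldl_cons, hstA] using hLF)
        have hLFv : LF.getD v 0 = Lv := PySem.Dict.getD_of_get?_eq_some _ 0 (hsub v Lv hv)
        have hLFn : LF.get? n = some Ln := hsub n Ln hLn
        -- the head step of B's phase-2 fold matches A's parent update
        have hhead : (if LF.get? n = some (LF.getD v 0 + 1)
              then d.modify n [] (fun l => l ++ [v]) else d) =
            (if LF.get? n = some (LF.getD v 0 + 1)
              then d.modify n [] (fun l => l ++ [v]) else d) := rfl
        by_cases hc : Ln = Lv + 1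
        · have hcB : LF.get? n = some (LF.getD v 0 + 1) := by rw [hLFn, hLFv, hc]
          have hcA : lv.getD v 0 = lv.getD n 0 - 1 := by rw [hvD, hLnD]; omega
          have hd' : ∀ k, (d.modify n [] (fun l => l ++ [v])).getD k [] = pr'.getD k [] := by
            intro k
            rw [hpr']
            simp only [if_pos hcA]
            rw [PySem.Dict.getD_modify, PySem.Dict.getD_modify]
            split
            · rw [hd n]
            · rw [hd k]
          have := ph2 LF (by simpa only [List.foldl_cons, hstA] using hLF)
            (d.modify n [] (fun l => l ++ [v])) hd' k
          simpa [hcB] using this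
        · have hcB : ¬ (LF.get? n = some (LF.getD v 0 + 1)) := by
            rw [hLFn, hLFv]; intro h; exact hc (by injection h)
          have hcA : ¬ (lv.getD v 0 = lv.getD n 0 - 1) := by rw [hvD, hLnD]; omega
          have hd' : ∀ k, d.getD k [] = pr'.getD k [] := by
            intro k; rw [hpr']; simp only [if_neg hcA]; exact hd k
          have := ph2 LF (by simpa only [List.foldl_cons, hstA] using hLF) d hd' k
          simpa [hcB] using this
    · -- n fresh: enqueue it, record its level, create its parent list
      have hn' : lv.contains n = false := by
        cases h : lv.contains n
        · rfl
        · exact absurd h hn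
      have hprn : pr.contains n = false := by rw [hkeq n]; exact hn'
      have hvne : v ≠ n := by
        intro he; subst he
        rw [(PySem.Dict.get?_eq_none_iff_contains lv v).2 hn'] at hv; exact absurd hv (by simp)
      set lv' := lv.insert n (lv.getD v 0 + 1) with hlv'
      have hstA : bfsStepA v (q, lv, pr) n = (q ++ [n], lv', pr.insert n [v]) := by
        simp [bfsStepA, hn', hprn, hlv']
      have hstB : bfsStepB1 v (q, lv) n = (q ++ [n], lv') := by simp [bfsStepB1, hn', hlv']
      have hkeq' : ∀ k, (pr.insert n [v]).contains k = lv'.contains k := by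
        intro k
        rw [hlv', PySem.Dict.contains_insert, PySem.Dict.contains_insert, hkeq k]
      have hnd' : lv'.keys.Nodup := PySem.Dict.nodup_keys_insert _ _ _ hnd
      have hv' : lv'.get? v = some Lv := by
        rw [hlv', PySem.Dict.get?_insert]
        simp [hvne, hv]
      obtain ⟨B1, ⟨fr, hfk, hfq, hfs⟩, nd2, sub2, keq2, ph2⟩ :=
        ih (q ++ [n]) lv' (pr.insert n [v]) hkeq' hnd' hv'
      refine ⟨?_, ⟨n :: fr, ?_, ?_, ?_⟩, ?_, ?_, ?_, ?_⟩
      · simp only [List.foldl_cons, hstA, hstB]; exact B1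
      · simp only [List.foldl_cons, hstA]
        rw [hfk, hlv', PySem.Dict.keys_insert_of_not_contains _ _ hn']
        simp
      · simp only [List.foldl_cons, hstA]
        rw [hfq]; simp
      · intro x hx
        rcases List.mem_cons.1 hx with h | h
        · subst h; exact List.mem_cons_self
        · exact List.mem_cons_of_mem _ (hfs x h)
      · simp only [List.foldl_cons, hstA]; exact nd2
      · simp only [List.foldl_cons, hstA]
        exact pvSub_trans (pvSub_insert _ hn') sub2
      · simp only [List.foldl_cons, hstA]; exact keq2
      · intro LF hLF d hd k
        simp only [List.foldl_cons, hstA]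
        have hsub' : pvSub lv' LF :=
          pvSub_trans (by simpa only [List.foldl_cons, hstA] using sub2)
            (by simpa only [List.foldl_cons, hstA] using hLF)
        have hLFv : LF.getD v 0 = Lv := by
          refine PySem.Dict.getD_of_get?_eq_some _ 0 (hsub' v Lv hv')
        have hLFn : LF.get? n = some (Lv + 1) := by
          have : lv'.get? n = some (lv.getD v 0 + 1) := by
            rw [hlv']; exact PySem.Dict.get?_insert_self lv n _
          rw [hvD] at this
          exact hsub' n (Lv + 1) this
        have hcB : LF.get? n = some (LF.getD v 0 + 1) := by rw [hLFn, hLFv]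
        have hd' : ∀ k, (d.modify n [] (fun l => l ++ [v])).getD k [] =
            (pr.insert n [v]).getD k [] := by
          intro k
          rw [PySem.Dict.getD_modify, PySem.Dict.getD_insert]
          split
          · rw [hd n, PySem.Dict.getD_of_not_contains _ _ hprn]; rfl
          · exact hd k
        have := ph2 LF (by simpa only [List.foldl_cons, hstA] using hLF)
          (d.modify n [] (fun l => l ++ [v])) hd' k
        simpa [hcB] using this

-- the main simulation: A's fused loop versus B's phase 1 + phase 2
lemma bfs_loop (g : PySem.Dict Int (List Int)) (N : List Int)
    (hg : ∀ v : Int, ∀ x ∈ g.getD v [], x ∈ N) :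
    ∀ (fuel : Nat) (q : List Int) (lv : PySem.Dict Int Int) (pr : PySem.Dict Int (List Int)) (dn : Nat),
    (∀ k, pr.contains k = lv.contains k) →
    lv.keys.Nodup →
    lv.keys.drop dn = q →
    q.length + (N.filter (fun n => !lv.contains n)).length ≤ fuel →
    bfsLoopB1 g fuel q lv = (bfsLoopA g fuel q lv pr).1 ∧
    (∃ nw, (bfsLoopA g fuel q lv pr).1.keys = lv.keys ++ nw) ∧
    pvSub lv (bfsLoopA g fuel q lv pr).1 ∧
    (bfsLoopA g fuel q lv pr).1.keys.Nodup ∧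
    (∀ d : PySem.Dict Int (List Int), (∀ k, d.getD k [] = pr.getD k []) →
      ∀ k, (((bfsLoopA g fuel q lv pr).1.keys.drop dn).foldl
              (bfsStepB2 g (bfsLoopA g fuel q lv pr).1) d).getD k []
            = (bfsLoopA g fuel q lv pr).2.getD k []) := by
  intro fuel
  induction fuel with
  | zero =>
    intro q lv pr dn hkeq hnd hdrop hfuel
    have hq : q = [] := List.eq_nil_of_length_eq_zero (by omega)
    subst hq
    have hA : bfsLoopA g 0 [] lv pr = (lv, pr) := by simp [bfsLoopA]
    have hB : bfsLoopB1 g 0 [] lv = lv := by simp [bfsLoopB1]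
    rw [hA, hB]
    refine ⟨rfl, ⟨[], by simp⟩, pvSub_refl lv, hnd, ?_⟩
    intro d hd k
    rw [hdrop]
    simpa using hd k
  | succ fuel ih =>
    intro q lv pr dn hkeq hnd hdrop hfuel
    match q with
    | [] =>
      have hA : bfsLoopA g (fuel + 1) [] lv pr = (lv, pr) := by simp [bfsLoopA]
      have hB : bfsLoopB1 g (fuel + 1) [] lv = lv := by simp [bfsLoopB1]
      rw [hA, hB]
      refine ⟨rfl, ⟨[], by simp⟩, pvSub_refl lv, hnd, ?_⟩
      intro d hd k
      rw [hdrop]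
      simpa using hd k
    | v :: q =>
      have hvmem : v ∈ lv.keys := by
        have : v ∈ lv.keys.drop dn := by rw [hdrop]; exact List.mem_cons_self
        exact List.mem_of_mem_drop this
      have hvex : ∃ x, lv.get? v = some x := by
        cases hg' : lv.get? v with
        | none => exact absurd hvmem ((PySem.Dict.get?_eq_none_iff_not_mem_keys lv v).1 hg')
        | some x => exact ⟨x, rfl⟩
      obtain ⟨Lv, hv⟩ := hvex
      obtain ⟨B1, ⟨fr, hfk, hfq, hfs⟩, nd2, sub2, keq2, ph2⟩ :=
        bfs_inner v Lv (g.getD v []) q lv pr hkeq hnd hv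
      set st := (g.getD v []).foldl (bfsStepA v) (q, lv, pr) with hst
      -- bookkeeping for the recursive call
      have hdnlt : dn < lv.keys.length := by
        by_contra h
        rw [List.drop_eq_nil_of_le (by omega)] at hdrop
        simp at hdrop
      have hdrop' : st.2.1.keys.drop (dn + 1) = st.1 := by
        rw [hfk, hfq, List.drop_append_of_le_length (by omega)]
        have : lv.keys.drop (dn + 1) = (lv.keys.drop dn).tail := by
          rw [List.tail_drop]
        rw [this, hdrop]
        rfl
      have hfrsub : ∀ x ∈ fr, x ∈ N := fun x hx => hg v x (hfs x hx)
      have hfrnd : fr.Nodup ∧ ∀ x ∈ fr, lv.contains x = false := by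
        have h2 := nd2
        rw [hfk] at h2
        constructor
        · exact (List.nodup_append.1 h2).2.1
        · intro x hx
          have hnin : x ∉ lv.keys := by
            have := (List.nodup_append.1 h2).2.2
            intro hmem
            exact false_of_ne (this x hmem x hx)
          cases hc : lv.contains x
          · rfl
          · exact absurd ((PySem.Dict.contains_iff_mem_keys lv x).1 hc) hnin
      have hcount : (N.filter (fun n => !st.2.1.contains n)).length + fr.length ≤
          (N.filter (fun n => !lv.contains n)).length := by
        have hmemkeys : ∀ n : Int, st.2.1.contains n = true ↔ (n ∈ lv.keys ∨ n ∈ fr) := by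
          intro n
          rw [PySem.Dict.contains_iff_mem_keys, hfk, List.mem_append]
        have hfe : N.filter (fun n => !st.2.1.contains n) =
            (N.filter (fun n => !lv.contains n)).filter (fun n => !decide (n ∈ fr)) := by
          rw [List.filter_filter]
          apply List.filter_congr
          intro x _
          cases hc : st.2.1.contains x
          · have : ¬ (x ∈ lv.keys ∨ x ∈ fr) := by
              intro h; have := (hmemkeys x).2 h; rw [hc] at this; exact Bool.noConfusion this
            push Not at this
            have hlvc : lv.contains x = false := by
              cases hlc : lv.contains x
              · rfl
              · exact absurd ((PySem.Dict.contains_iff_mem_keys lv x).1 hlc) this.1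
            simp [hlvc, this.2]
          · have := (hmemkeys x).1 hc
            rcases this with h | h
            · have : lv.contains x = true := (PySem.Dict.contains_iff_mem_keys lv x).2 h
              simp [this]
            · simp [h]
        have hsplit : ((N.filter (fun n => !lv.contains n)).filter (fun n => decide (n ∈ fr))).length +
            ((N.filter (fun n => !lv.contains n)).filter (fun n => !decide (n ∈ fr))).length =
            (N.filter (fun n => !lv.contains n)).length := by
          induction (N.filter (fun n => !lv.contains n)) with
          | nil => simp
          | cons a t iht =>
            by_cases ha : a ∈ fr <;> simp [ha] <;> omega
        have hge : fr.length ≤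
            ((N.filter (fun n => !lv.contains n)).filter (fun n => decide (n ∈ fr))).length := by
          apply nodup_subset_length hfrnd.1
          intro x hx
          rw [List.mem_filter, List.mem_filter]
          exact ⟨⟨hfrsub x hx, by simp [hfrnd.2 x hx]⟩, by simp [hx]⟩
        rw [hfe]
        omega
      have hfuel' : st.1.length + (N.filter (fun n => !st.2.1.contains n)).length ≤ fuel := by
        rw [hfq]
        simp only [List.length_append]
        simp only [List.length_cons] at hfuel
        omega
      obtain ⟨B1r, ⟨nw, hkeys⟩, subr, ndr, ph2r⟩ := ih st.1 st.2.1 st.2.2 (dn + 1) keq2 nd2 hdrop' hfuel'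
      have hloopA : bfsLoopA g (fuel + 1) (v :: q) lv pr = bfsLoopA g fuel st.1 st.2.1 st.2.2 := by
        conv_lhs => rw [bfsLoopA]
      have hloopB : bfsLoopB1 g (fuel + 1) (v :: q) lv = bfsLoopB1 g fuel st.1 st.2.1 := by
        conv_lhs => rw [bfsLoopB1]
        rw [B1]
      refine ⟨?_, ⟨fr ++ nw, ?_⟩, ?_, ?_, ?_⟩
      · rw [hloopA, hloopB]; exact B1r
      · rw [hloopA, hkeys, hfk, List.append_assoc]
      · rw [hloopA]; exact pvSub_trans sub2 subr
      · rw [hloopA]; exact ndr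
      · intro d hd k
        rw [hloopA]
        set R := bfsLoopA g fuel st.1 st.2.1 st.2.2 with hR
        have hq1 : lv.keys.drop (dn + 1) = q := by
          have h1 : lv.keys.drop (dn + 1) = (lv.keys.drop dn).tail := by rw [List.tail_drop]
          rw [h1, hdrop]
          rfl
        have hdropR : R.1.keys.drop dn = v :: R.1.keys.drop (dn + 1) := by
          have e1 : R.1.keys.drop dn = lv.keys.drop dn ++ (fr ++ nw) := by
            rw [hkeys, hfk, List.append_assoc,
              List.drop_append_of_le_length (le_of_lt hdnlt)]
          have e2 : R.1.keys.drop (dn + 1) = lv.keys.drop (dn + 1) ++ (fr ++ nw) := by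
            rw [hkeys, hfk, List.append_assoc, List.drop_append_of_le_length hdnlt]
          rw [e1, e2, hdrop, hq1]
          rfl
        rw [hdropR]
        simp only [List.foldl_cons]
        have hinner : ∀ k, (bfsStepB2 g R.1 d v).getD k [] = st.2.2.getD k [] := by
          intro k
          simp only [bfsStepB2]
          exact ph2 R.1 subr d hd k
        exact ph2r (bfsStepB2 g R.1 d v) hinner k

lemma get?_mk_mem : ∀ (ps : List (Int × List Int)) (v : Int) (l : List Int),
    (PySem.Dict.mk ps).get? v = some l → (v, l) ∈ ps := by
  intro ps
  induction ps with
  | nil =>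
    intro v l h
    rw [show (PySem.Dict.mk ([] : List (Int × List Int))).get? v = none from rfl] at h
    exact absurd h (by simp)
  | cons p rest ih =>
    obtain ⟨a, b⟩ := p
    intro v l h
    rw [PySem.Dict.get?_mk_cons] at h
    split at h
    · rename_i hpv
      have h1 : a = v := by simpa using hpv
      injection h with h2
      exact List.mem_cons.2 (Or.inl (by rw [h1, h2]))
    · exact List.mem_cons_of_mem _ (ih v l h)

lemma getD_foldl_insert_nil : ∀ (l : List Int) (d : PySem.Dict Int (List Int)),
    (∀ k, d.getD k [] = []) → ∀ k,
    (l.foldl (fun d node => d.insert node ([] : List Int)) d).getD k [] = [] := by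
  intro l
  induction l with
  | nil => intro d hd k; simpa using hd k
  | cons a t ih =>
    intro d hd k
    simp only [List.foldl_cons]
    refine ih _ ?_ k
    intro k'
    rw [PySem.Dict.getD_insert]
    split
    · rfl
    · exact hd k'

-- ===== VERDICT (by name: the statement is the Claim_ definition above) =====
theorem bfs_spec : Claim_equal_bfs := by
  intro graph root_node _hdom _hpre
  unfold Spec_bfs
  have hg : ∀ v : Int, ∀ x ∈ (PySem.Dict.mk graph).getD v [], x ∈ bfsAllNodes graph := by
    intro v x hx
    cases hgv : (PySem.Dict.mk graph).get? v with
    | none =>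
      rw [PySem.Dict.getD_eq_get?_getD, hgv] at hx
      exact absurd hx (by simp)
    | some l =>
      rw [PySem.Dict.getD_eq_get?_getD, hgv] at hx
      have hmem := get?_mk_mem graph v l hgv
      exact List.mem_dedup.2 (List.mem_flatMap.2 ⟨(v, l), hmem, hx⟩)
  have hkeq : ∀ k, (PySem.Dict.mk [(root_node, ([] : List Int))]).contains k =
      (PySem.Dict.mk [(root_node, (0 : Int))]).contains k := by
    intro k; simp [PySem.Dict.contains_mk]
  have hnd : (PySem.Dict.mk [(root_node, (0 : Int))]).keys.Nodup := by
    simp [PySem.Dict.keys_mk]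
  have hdrop : (PySem.Dict.mk [(root_node, (0 : Int))]).keys.drop 0 = [root_node] := by
    simp [PySem.Dict.keys_mk]
  have hfuel : [root_node].length +
      ((bfsAllNodes graph).filter
        (fun n => !(PySem.Dict.mk [(root_node, (0 : Int))]).contains n)).length ≤
      bfsFuel graph := by
    have := List.length_filter_le
      (fun n => !(PySem.Dict.mk [(root_node, (0 : Int))]).contains n) (bfsAllNodes graph)
    simp only [List.length_cons, List.length_nil, bfsFuel]
    omega
  obtain ⟨B1, ⟨nw, hkeys⟩, subT, ndT, ph2T⟩ :=
    bfs_loop (PySem.Dict.mk graph) (bfsAllNodes graph) hg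
      (bfsFuel graph) [root_node] (PySem.Dict.mk [(root_node, (0 : Int))])
      (PySem.Dict.mk [(root_node, ([] : List Int))]) 0 hkeq hnd hdrop hfuel
  simp only [bfs, bfs_alt]
  rw [B1]
  set LA := bfsLoopA (PySem.Dict.mk graph) (bfsFuel graph) [root_node]
    (PySem.Dict.mk [(root_node, (0 : Int))]) (PySem.Dict.mk [(root_node, ([] : List Int))])
    with hLA
  set P0 := LA.1.keys.foldl (fun d node => d.insert node ([] : List Int)) PySem.Dict.empty
    with hP0
  have hd0 : ∀ k, P0.getD k [] =
      (PySem.Dict.mk [(root_node, ([] : List Int))]).getD k [] := by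
    intro k
    rw [hP0, getD_foldl_insert_nil _ _ (fun k => by simp [PySem.Dict.getD_empty]) k]
    rw [PySem.Dict.getD_eq_get?_getD, PySem.Dict.get?_mk_cons]
    split <;> rfl
  have hB : ∀ k, (LA.1.keys.foldl (bfsStepB2 (PySem.Dict.mk graph) LA.1) P0).getD k [] =
      LA.2.getD k [] := by
    intro k
    have := ph2T P0 hd0 k
    rwa [List.drop_zero] at this
  have hfun : (fun (dag : PySem.Dict Int (Int × List Int)) node =>
        dag.insert node (LA.1.getD node 0,
          (LA.1.keys.foldl (bfsStepB2 (PySem.Dict.mk graph) LA.1) P0).getD node [])) =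
      (fun (dag : PySem.Dict Int (Int × List Int)) node =>
        dag.insert node (LA.1.getD node 0, LA.2.getD node [])) := by
    funext dag node
    rw [hB node]
  rw [hfun]
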